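-- pv_equiv track=rewrite | github.com/aesselka/pp2_1lab | лaб3/functions.py | gh
-- ===== SOURCE A (Python) =====
-- def gh(large=[]):
--     cout=0
--     for i in range(0,len(large)):
--         if((large[i]==0)):
--             cout+=1
--         elif ((large[i]==7)and cout==2):
--             return True
--     return False
-- ===== SOURCE B (Python) =====
-- def gh(large=[]):
--     zeros = [i for i, x in enumerate(large) if x == 0]
--     if len(zeros) < 2:
--         return False
--     stop = zeros[2] if len(zeros) >= 3 else len(large)
--     return 7 in large[zeros[1] + 1 : stop]
-- ===== Notes on version B (the rewrite author's own statement) =====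
-- stated objective: alternative
-- what changed: B replaces A's single interleaved count-and-check pass (a running zero counter with an early return) by building the list of zero positions once and testing membership of 7 in the single slice strictly between the second and third zero (or end of list).
import Mathlib
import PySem

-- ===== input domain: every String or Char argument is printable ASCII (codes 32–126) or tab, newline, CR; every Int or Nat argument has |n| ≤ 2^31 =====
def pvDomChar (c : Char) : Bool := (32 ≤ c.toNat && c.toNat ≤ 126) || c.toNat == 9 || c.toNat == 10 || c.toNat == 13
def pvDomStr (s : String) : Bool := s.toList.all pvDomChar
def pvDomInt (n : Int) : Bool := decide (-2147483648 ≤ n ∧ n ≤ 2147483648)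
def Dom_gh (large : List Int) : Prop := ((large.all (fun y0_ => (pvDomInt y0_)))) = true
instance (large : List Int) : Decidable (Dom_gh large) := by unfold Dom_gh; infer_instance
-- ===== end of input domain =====

-- B builds the zero-position table once and tests 7-membership in one slice; A keeps a running
-- zero counter with an early return. Alternative decomposition, same asymptotic cost.

-- ===== PORT A =====
def ghLoop (large : List Int) (idxs : List Int) (cout : Int) : Bool :=
  match idxs with
  | [] => false
  | i :: rest =>
      if PySem.List.pyGetD large i 0 == 0 then ghLoop large rest (cout + 1)
      else if PySem.List.pyGetD large i 0 == 7 && cout == 2 then true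
      else ghLoop large rest cout

def gh (large : List Int) : Bool :=
  ghLoop large (PySem.List.pyRange 0 (PySem.List.len large) 1) 0

-- ===== PORT B =====
def gh_alt (large : List Int) : Bool :=
  let zeros : List Int :=
    ((PySem.List.enumerate large).filter (fun p => p.2 == 0)).map (fun p => p.1)
  if zeros.length < 2 then false
  else
    let stop : Int :=
      if 3 ≤ zeros.length then PySem.List.pyGetD zeros 2 0 else PySem.List.len large
    (PySem.List.slice large (some (PySem.List.pyGetD zeros 1 0 + 1)) (some stop)).contains 7

-- ===== PRECONDITION & SPEC =====
def Spec_gh (large : List Int) (out : Bool) : Prop := out = gh_alt large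
instance (large : List Int) (out : Bool) : Decidable (Spec_gh large out) := by unfold Spec_gh; infer_instance

-- ===== CLAIM (what is proved, stated in full; the proofs are below) =====
def Claim_equal_gh : Prop := ∀ (large : List Int), Dom_gh large → Spec_gh large (gh large)

-- ===== LEMMAS AND PROOFS =====

-- A's loop re-expressed as structural recursion on the list suffix.
def ghRec : List Int → Int → Bool
  | [], _ => false
  | v :: t, c =>
      if v == 0 then ghRec t (c + 1)
      else if v == 7 && c == 2 then true
      else ghRec t c

-- Positions (as Nats) of the zeros of the list, front to back.
def natZeros : List Int → List Nat
  | [] => []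
  | v :: t => if v = 0 then 0 :: (natZeros t).map (· + 1) else (natZeros t).map (· + 1)

-- The common specification: some 7 preceded by exactly c-complement… i.e. exactly 2 - c zeros before it.
def S (l : List Int) (c : Int) : Prop :=
  ∃ j : Nat, j < l.length ∧ l.getD j 0 = 7 ∧ c + ((l.take j).countP (fun x => x == 0) : Int) = 2


lemma ghLoop_suffix (l : List Int) : ∀ (n i : Nat) (c : Int), l.length - i ≤ n →
    ghLoop l (PySem.List.pyRange (i : Int) (l.length : Int) 1) c = ghRec (l.drop i) c := by
  intro n
  induction n with
  | zero =>
      intro i c h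
      have hge : l.length ≤ i := by omega
      rw [PySem.List.pyRange_one_eq_nil (by exact_mod_cast hge), List.drop_eq_nil_of_le hge]
      rfl
  | succ n ih =>
      intro i c h
      by_cases hi : i < l.length
      · rw [PySem.List.pyRange_one_cons (by exact_mod_cast hi)]
        have hd : l.drop i = l[i] :: l.drop (i + 1) := List.drop_eq_getElem_cons hi
        have hget : PySem.List.pyGetD l (i : Int) 0 = l[i] := by
          simp [PySem.List.pyGetD_natCast, List.getD_eq_getElem?_getD, hi]
        have : ((i : Int) + 1) = ((i + 1 : Nat) : Int) := by push_cast; ring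
        rw [ghLoop, hget, this, hd, ghRec]
        rw [ih (i+1) (c+1) (by omega), ih (i+1) c (by omega)]
      · have hge : l.length ≤ i := by omega
        rw [PySem.List.pyRange_one_eq_nil (by exact_mod_cast hge), List.drop_eq_nil_of_le hge]
        rfl

lemma gh_eq_ghRec (l : List Int) : gh l = ghRec l 0 := by
  have := ghLoop_suffix l l.length 0 0 (by omega)
  simpa [gh] using this

lemma ghRec_iff (l : List Int) : ∀ c, ghRec l c = true ↔ S l c := by
  induction l with
  | nil => intro c; simp [ghRec, S]
  | cons v t ih =>
      intro c
      by_cases hv : v = 0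
      · subst hv
        rw [ghRec]
        simp only [beq_self_eq_true, if_true, ih]
        constructor
        · rintro ⟨j, hj, h7, hc⟩
          exact ⟨j + 1, by simpa using hj, by simpa using h7, by
            simp [List.take_succ_cons] at *
            omega⟩
        · rintro ⟨j, hj, h7, hc⟩
          match j with
          | 0 => simp at h7
          | j + 1 =>
              refine ⟨j, by simpa using hj, by simpa using h7, ?_⟩
              simp [List.take_succ_cons] at hc ⊢
              omega
      · rw [ghRec]
        simp only [beq_iff_eq, hv, if_false]
        by_cases h72 : v = 7 ∧ c = 2
        · obtain ⟨h7, h2⟩ := h72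
          subst h7 h2
          simp [S]
          exact ⟨0, by omega, by simp, by simp⟩
        · have hcond : (v == 7 && c == 2) = false := by
            simp only [Bool.and_eq_false_iff, beq_eq_false_iff_ne]
            by_cases h7 : v = 7
            · right; intro h2; exact h72 ⟨h7, h2⟩
            · left; exact h7
          rw [hcond, if_neg (by simp), ih]
          constructor
          · rintro ⟨j, hj, h7, hc⟩
            exact ⟨j + 1, by simpa using hj, by simpa using h7, by
              simp [List.take_succ_cons, hv] at *
              omega⟩
          · rintro ⟨j, hj, h7, hc⟩
            match j with
            | 0 =>
                simp at h7 hc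
                exact absurd ⟨h7, by omega⟩ h72
            | j + 1 =>
                refine ⟨j, by simpa using hj, by simpa using h7, ?_⟩
                simp [List.take_succ_cons, hv] at hc ⊢
                omega

lemma zeros_eq (l : List Int) : ∀ s : Int,
    ((PySem.List.enumerate l s).filter (fun p => p.2 == 0)).map (fun p => p.1)
      = (natZeros l).map (fun k : Nat => s + (k : Int)) := by
  induction l with
  | nil => intro s; simp [PySem.List.enumerate_nil, natZeros]
  | cons v t ih =>
      intro s
      rw [PySem.List.enumerate_cons, natZeros]
      by_cases hv : v = 0
      · subst hv
        rw [if_pos rfl, List.filter_cons_of_pos (by simp), List.map_cons, List.map_cons,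
          ih (s + 1), List.map_map]
        refine congrArg₂ List.cons (by simp) (List.map_congr_left ?_)
        intro k _
        simp [Function.comp]
        ring
      · rw [if_neg hv, List.filter_cons_of_neg (by simpa using hv), ih (s + 1), List.map_map]
        refine List.map_congr_left ?_
        intro k _
        simp [Function.comp]
        ring

lemma natZeros_pairwise (l : List Int) : (natZeros l).Pairwise (· < ·) := by
  induction l with
  | nil => simp [natZeros]
  | cons v t ih =>
      rw [natZeros]
      by_cases hv : v = 0
      · simp only [hv, if_true]
        refine List.Pairwise.cons ?_ ?_
        · intro k hk; simp at hk; omega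
        · exact (List.pairwise_map).mpr (ih.imp (by omega))
      · simp only [hv, if_false]
        exact (List.pairwise_map).mpr (ih.imp (by omega))

lemma natZeros_mem (l : List Int) : ∀ k ∈ natZeros l, k < l.length ∧ l.getD k 0 = 0 := by
  induction l with
  | nil => simp [natZeros]
  | cons v t ih =>
      intro k hk
      rw [natZeros] at hk
      by_cases hv : v = 0
      · simp only [hv, if_true, List.mem_cons, List.mem_map] at hk
        rcases hk with h0 | ⟨m, hm, rfl⟩
        · subst h0; simp [hv]
        · have := ih m hm; simpa using this
      · simp only [hv, if_false, List.mem_map] at hk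
        obtain ⟨m, hm, rfl⟩ := hk
        have := ih m hm; simpa using this

lemma countP_map_succ_lt (p : List Nat) (j : Nat) :
    (p.map (· + 1)).countP (fun k => k < j + 1) = p.countP (fun k => k < j) := by
  rw [List.countP_map]
  apply List.countP_congr
  intro k _
  simp [Function.comp]

lemma countP_take_eq (l : List Int) : ∀ j : Nat,
    (l.take j).countP (fun x => x == 0) = (natZeros l).countP (fun k => k < j) := by
  induction l with
  | nil => simp [natZeros]
  | cons v t ih =>
      intro j
      match j with
      | 0 => simp
      | j + 1 =>
          rw [List.take_succ_cons, List.countP_cons, natZeros]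
          by_cases hv : v = 0
          · rw [if_pos hv, List.countP_cons, countP_map_succ_lt, ih j]
            simp [hv]
          · rw [if_neg hv, countP_map_succ_lt, ih j]
            simp [hv]

lemma sorted_countP_lt (zs : List Nat) (hs : zs.Pairwise (· < ·)) :
    ∀ (k j : Nat), (k + 1 ≤ zs.countP (fun z => z < j)) ↔ (k < zs.length ∧ zs.getD k 0 < j) := by
  induction zs with
  | nil => simp
  | cons z t ih =>
      have hz : ∀ y ∈ t, z < y := fun y hy => (List.pairwise_cons.mp hs).1 y hy
      have iht := ih (List.pairwise_cons.mp hs).2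
      intro k j
      by_cases hzj : z < j
      · rw [List.countP_cons]
        simp only [hzj, decide_true, if_true]
        match k with
        | 0 =>
            simp only [List.length_cons, List.getD_cons_zero]
            constructor
            · intro _; exact ⟨by omega, hzj⟩
            · intro _; omega
        | k + 1 =>
            have h := iht k j
            simp only [List.length_cons, List.getD_cons_succ]
            constructor
            · intro hle
              have : k + 1 ≤ t.countP (fun z => decide (z < j)) := by omega
              have := h.mp this
              exact ⟨by omega, this.2⟩
            · rintro ⟨hk, hlt⟩
              have : k + 1 ≤ t.countP (fun z => decide (z < j)) := h.mpr ⟨by omega, hlt⟩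
              omega
      · have ht0 : t.countP (fun z => decide (z < j)) = 0 := by
          rw [List.countP_eq_zero]
          intro y hy
          have := hz y hy
          simp
          omega
        have hcnt : (z :: t).countP (fun z => decide (z < j)) = 0 := by
          rw [List.countP_cons, ht0]
          simp [hzj]
        rw [hcnt]
        constructor
        · intro h; omega
        · rintro ⟨hk, hlt⟩
          exfalso
          match k with
          | 0 =>
              rw [List.getD_cons_zero] at hlt
              exact hzj hlt
          | k + 1 =>
              rw [List.getD_cons_succ] at hlt
              simp only [List.length_cons] at hk
              have hk' : k < t.length := by omega
              have hmem : t.getD k 0 ∈ t := by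
                rw [List.getD_eq_getElem?_getD, List.getElem?_eq_getElem hk']
                exact List.getElem_mem hk'
              have := hz _ hmem
              omega

lemma getD_mem_self {zs : List Nat} {k : Nat} (h : k < zs.length) : zs.getD k 0 ∈ zs := by
  rw [List.getD_eq_getElem?_getD, List.getElem?_eq_getElem h]
  exact List.getElem_mem h

lemma gh_alt_iff (l : List Int) : gh_alt l = true ↔ S l 0 := by
  have hmap : (natZeros l).map (fun k : Nat => (0 : Int) + (k : Int))
      = (natZeros l).map (fun k : Nat => (k : Int)) :=
    List.map_congr_left (fun k _ => by ring)
  have hcnt := countP_take_eq l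
  have hsort := sorted_countP_lt (natZeros l) (natZeros_pairwise l)
  rw [gh_alt]
  simp only [zeros_eq l 0, hmap, List.length_map]
  by_cases h2 : (natZeros l).length < 2
  · rw [if_pos h2]
    simp only [Bool.false_eq_true, false_iff]
    rintro ⟨j, hj, h7, hc⟩
    have hle := List.countP_le_length (p := fun k => decide (k < j)) (l := natZeros l)
    have := hcnt j
    omega
  · rw [if_neg h2]
    have h2' : 2 ≤ (natZeros l).length := by omega
    have hz1 := natZeros_mem l ((natZeros l).getD 1 0) (getD_mem_self (by omega))
    have hstople : (if 3 ≤ (natZeros l).length then (natZeros l).getD 2 0 else l.length)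
        ≤ l.length := by
      split_ifs with h3
      · exact (natZeros_mem l ((natZeros l).getD 2 0) (getD_mem_self (by omega))).1.le
      · exact le_rfl
    have hget1 : PySem.List.pyGetD ((natZeros l).map (fun k : Nat => (k : Int))) 1 0
        = (((natZeros l).getD 1 0 : Nat) : Int) := by
      rw [PySem.List.pyGetD_ofNat', List.getD_eq_getElem _ _ (by simpa using h2'),
        List.getElem_map, List.getD_eq_getElem _ _ (by omega)]
    have hstop : (if 3 ≤ (natZeros l).length
          then PySem.List.pyGetD ((natZeros l).map (fun k : Nat => (k : Int))) 2 0
          else PySem.List.len l)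
        = (((if 3 ≤ (natZeros l).length then (natZeros l).getD 2 0 else l.length) : Nat) : Int) := by
      split_ifs with h3
      · rw [PySem.List.pyGetD_ofNat', List.getD_eq_getElem _ _ (by simpa using (by omega : 2 < (natZeros l).length)),
          List.getElem_map, List.getD_eq_getElem _ _ (by omega)]
      · simp [PySem.List.len]
    rw [hget1, hstop]
    have hcast : (((natZeros l).getD 1 0 : Nat) : Int) + 1
        = (((natZeros l).getD 1 0 + 1 : Nat) : Int) := by push_cast; ring
    rw [hcast, PySem.List.slice_natCast]
    rw [show ((l.drop ((natZeros l).getD 1 0 + 1)).take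
        ((if 3 ≤ (natZeros l).length then (natZeros l).getD 2 0 else l.length)
          - ((natZeros l).getD 1 0 + 1))).contains 7 = true
        ↔ (7 : Int) ∈ (l.drop ((natZeros l).getD 1 0 + 1)).take
        ((if 3 ≤ (natZeros l).length then (natZeros l).getD 2 0 else l.length)
          - ((natZeros l).getD 1 0 + 1)) from by simp]
    constructor
    · intro h7
      obtain ⟨i, hi, hEq⟩ := List.mem_iff_getElem.mp h7
      simp only [List.length_take, List.length_drop, lt_min_iff] at hi
      simp only [List.getElem_take, List.getElem_drop] at hEq
      have hji : (natZeros l).getD 1 0 + 1 + i < l.length := by omega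
      refine ⟨(natZeros l).getD 1 0 + 1 + i, hji, ?_, ?_⟩
      · rw [List.getD_eq_getElem _ _ hji, hEq]
      · rw [hcnt ((natZeros l).getD 1 0 + 1 + i)]
        have hge : 1 + 1 ≤ (natZeros l).countP (fun k => k < (natZeros l).getD 1 0 + 1 + i) :=
          (hsort 1 ((natZeros l).getD 1 0 + 1 + i)).mpr ⟨by omega, by omega⟩
        have hlt : ¬ (2 + 1 ≤ (natZeros l).countP (fun k => k < (natZeros l).getD 1 0 + 1 + i)) := by
          intro h3c
          have h23 := (hsort 2 ((natZeros l).getD 1 0 + 1 + i)).mp h3c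
          by_cases h3 : 3 ≤ (natZeros l).length
          · rw [if_pos h3] at hi
            omega
          · omega
        omega
    · rintro ⟨j, hj, h7, hc⟩
      have hcj : (natZeros l).countP (fun k => k < j) = 2 := by
        have := hcnt j
        omega
      have hz1j : (natZeros l).getD 1 0 < j := by
        have := (hsort 1 j).mp (by omega)
        omega
      have hjstop : j < (if 3 ≤ (natZeros l).length then (natZeros l).getD 2 0 else l.length) := by
        split_ifs with h3
        · have hz2 := natZeros_mem l ((natZeros l).getD 2 0) (getD_mem_self (by omega))
          have hnot : ¬ (2 + 1 ≤ (natZeros l).countP (fun k => k < j)) := by omega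
          have hle2 : ¬ (2 < (natZeros l).length ∧ (natZeros l).getD 2 0 < j) :=
            fun h => hnot ((hsort 2 j).mpr h)
          have hjle : j ≤ (natZeros l).getD 2 0 := by
            by_contra hgt
            exact hle2 ⟨by omega, by omega⟩
          have hne : j ≠ (natZeros l).getD 2 0 := by
            intro heq
            rw [heq, hz2.2] at h7
            norm_num at h7
          omega
        · exact hj
      refine List.mem_iff_getElem.mpr ⟨j - ((natZeros l).getD 1 0 + 1), ?_, ?_⟩
      · simp only [List.length_take, List.length_drop, lt_min_iff]
        omega
      · simp only [List.getElem_take, List.getElem_drop]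
        have hidx : (natZeros l).getD 1 0 + 1 + (j - ((natZeros l).getD 1 0 + 1)) = j := by omega
        simp only [hidx]
        rw [List.getD_eq_getElem _ _ hj] at h7
        exact h7

theorem gh_spec : Claim_equal_gh := by
  intro l _
  unfold Spec_gh
  rw [gh_eq_ghRec]
  have hA := ghRec_iff l 0
  have hB := gh_alt_iff l
  cases hA' : ghRec l 0 <;> cases hB' : gh_alt l <;> simp_all
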